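-- pv_equiv track=rewrite | github.com/joefarebrother/adventofcode | 2019/day16.py | part2
-- ===== SOURCE A (Python) =====
-- def part2(inp):
--     out = []
--     psum = 0
--     for _, i in enumerate(inp):
--         psum += i
--         psum %= 10
--         out.append(psum)
--     return out
-- ===== SOURCE B (Python) =====
-- def part2(inp):
--     # Back-to-front: the i-th prefix sum equals the grand total minus the
--     # suffix sum after i.  Compute the total once, walk the list in reverse
--     # emitting total % 10 and subtracting, then reverse the output.
--     t = sum(inp)
--     out = []
--     for x in reversed(inp):
--         out.append(t % 10)
--         t -= x
--     out.reverse()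
--     return out
-- ===== Notes on version B (the rewrite author's own statement) =====
-- stated objective: alternative
-- what changed: B computes the grand total once and then traverses the input in REVERSE, emitting each prefix sum as total%10 and subtracting the current element, building the output back-to-front and reversing it, instead of A's forward loop that accumulates and re-reduces mod 10 at each step.
import Mathlib
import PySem

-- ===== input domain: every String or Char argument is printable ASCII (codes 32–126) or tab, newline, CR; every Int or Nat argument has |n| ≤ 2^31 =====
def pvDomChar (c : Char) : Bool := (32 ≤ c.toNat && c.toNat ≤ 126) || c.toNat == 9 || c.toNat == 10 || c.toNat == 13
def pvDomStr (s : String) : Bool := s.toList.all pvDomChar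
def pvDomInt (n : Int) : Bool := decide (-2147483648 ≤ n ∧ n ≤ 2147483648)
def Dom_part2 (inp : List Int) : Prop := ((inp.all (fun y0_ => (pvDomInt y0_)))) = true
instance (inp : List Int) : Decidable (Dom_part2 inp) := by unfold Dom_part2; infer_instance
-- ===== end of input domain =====

-- B replaces A's forward accumulate-and-mod loop by a reverse traversal from the grand total,
-- emitting total%10 and subtracting, building the output back-to-front (alternative; equal cost).

-- ===== PORT A =====
-- A: one forward loop over enumerate(inp); psum is re-reduced mod 10 at every step and appended.
def part2 (inp : List Int) : List Int :=
  ((PySem.List.enumerate inp).foldl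
    (fun (st : List Int × Int) p =>
      let psum := PySem.Int.mod (st.2 + p.2) 10
      (st.1 ++ [psum], psum))
    ([], 0)).1

-- ===== PORT B =====
-- B: t = sum(inp); loop over reversed(inp) appending t % 10 then t -= x; reverse the output.
def part2_alt (inp : List Int) : List Int :=
  let t0 := inp.foldl (· + ·) 0
  let st := inp.reverse.foldl
    (fun (st : List Int × Int) x => (st.1 ++ [PySem.Int.mod st.2 10], st.2 - x))
    ([], t0)
  st.1.reverse

-- ===== PRECONDITION & SPEC =====
def Spec_part2 (inp : List Int) (out : List Int) : Prop := out = part2_alt inp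
instance (inp : List Int) (out : List Int) : Decidable (Spec_part2 inp out) := by unfold Spec_part2; infer_instance

-- ===== CLAIM (what is proved, stated in full; the proofs are below) =====
def Claim_equal_part2 : Prop := ∀ (inp : List Int), Dom_part2 inp → Spec_part2 inp (part2 inp)

-- ===== LEMMAS AND PROOFS =====

-- reference form: prefix sums from seed s, reduced mod 10 at each element
def pvGo (xs : List Int) (s : Int) : List Int :=
  match xs with
  | [] => []
  | x :: r => PySem.Int.mod (s + x) 10 :: pvGo r (s + x)

-- reference form of B's reverse loop: emitted values for element list ys starting at running total t
def pvBk (ys : List Int) (t : Int) : List Int :=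
  match ys with
  | [] => []
  | y :: r => PySem.Int.mod t 10 :: pvBk r (t - y)

lemma pvMod_absorb (s x : Int) :
    PySem.Int.mod (PySem.Int.mod s 10 + x) 10 = PySem.Int.mod (s + x) 10 := by
  rw [PySem.Int.mod_eq_emod_of_pos (by norm_num),
      PySem.Int.mod_eq_emod_of_pos (by norm_num),
      PySem.Int.mod_eq_emod_of_pos (by norm_num)]
  exact Int.emod_add_emod s 10 x

lemma partA_inv (xs : List (Int × Int)) : ∀ (out : List Int) (s : Int),
    (xs.foldl
      (fun (st : List Int × Int) p =>
        let psum := PySem.Int.mod (st.2 + p.2) 10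
        (st.1 ++ [psum], psum))
      (out, PySem.Int.mod s 10)).1 = out ++ pvGo (xs.map (·.2)) s := by
  induction xs with
  | nil => intro out s; simp [pvGo]
  | cons p r ih =>
    intro out s
    simp only [List.foldl_cons]
    rw [pvMod_absorb]
    have h := ih (out ++ [PySem.Int.mod (s + p.2) 10]) (s + p.2)
    simp only [List.map_cons, pvGo]
    rw [h]
    simp [List.append_assoc]

lemma partB_inv (ys : List Int) : ∀ (out : List Int) (t : Int),
    (ys.foldl
      (fun (st : List Int × Int) x => (st.1 ++ [PySem.Int.mod st.2 10], st.2 - x))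
      (out, t)).1 = out ++ pvBk ys t := by
  induction ys with
  | nil => intro out t; simp [pvBk]
  | cons y r ih =>
    intro out t
    simp only [List.foldl_cons]
    rw [ih (out ++ [PySem.Int.mod t 10]) (t - y)]
    simp [pvBk, List.append_assoc]

lemma pvBk_append (a b : List Int) (t : Int) :
    pvBk (a ++ b) t = pvBk a t ++ pvBk b (t - a.sum) := by
  induction a generalizing t with
  | nil => simp [pvBk]
  | cons x r ih =>
    simp only [List.cons_append, pvBk, ih, List.sum_cons]
    have : t - x - r.sum = t - (x + r.sum) := by ring
    rw [this]

lemma pvBk_rev (xs : List Int) : ∀ (s : Int),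
    (pvBk xs.reverse (s + xs.sum)).reverse = pvGo xs s := by
  induction xs with
  | nil => intro s; simp [pvBk, pvGo]
  | cons x r ih =>
    intro s
    simp only [List.reverse_cons, List.sum_cons]
    rw [pvBk_append]
    have hsum : r.reverse.sum = r.sum := List.sum_reverse r
    have h1 : s + (x + r.sum) = (s + x) + r.sum := by ring
    have h2 : (s + x) + r.sum - r.reverse.sum = s + x := by rw [hsum]; ring
    rw [h1, h2]
    simp only [List.reverse_append, pvBk, pvGo]
    rw [ih (s + x)]
    simp

lemma foldl_add_eq_sum (xs : List Int) : xs.foldl (· + ·) 0 = xs.sum := by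
  simp [List.sum_eq_foldl]

-- ===== VERDICT (by name: the statement is the Claim_ definition above) =====
theorem part2_spec : Claim_equal_part2 := by
  intro inp _
  unfold Spec_part2 part2 part2_alt
  have hA := partA_inv (PySem.List.enumerate inp) [] 0
  rw [show PySem.Int.mod 0 10 = 0 from by decide] at hA
  rw [hA]
  simp only [foldl_add_eq_sum]
  rw [partB_inv inp.reverse [] inp.sum]
  have h := pvBk_rev inp 0
  rw [zero_add] at h
  simp only [List.nil_append, PySem.List.map_snd_enumerate]
  exact h.symm
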